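-- pv_equiv track=rewrite | github.com/joway/PyAlgorithm | algorithm/calculation/topk.py | top_k_order_by_value
-- ===== SOURCE A (Python) =====
-- def top_k_order_by_value(ary: list, k):
--     if len(ary) < k:
--         return None
--     result = ary[:k]
--     for i in range(k, len(ary)):
--         if ary[i] > min(result):
--             result[result.index(min(result))] = ary[i]
--     return result
-- ===== SOURCE B (Python) =====
-- def top_k_order_by_value(ary: list, k):
--     if len(ary) < k:
--         return None
--     state = []
--     for i, v in enumerate(ary[:k]):
--         _insort(state, (v, i))
--     for x in ary[k:]:
--         if state and x > state[0][0]: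
--             slot = state[0][1]
--             del state[0]
--             _insort(state, (x, slot))
--     out = []
--     for p in state:
--         _insort(out, (p[1], p[0]))
--     return [v for _, v in out]
--
-- def _insort(lst, pair):
--     lo, hi = 0, len(lst)
--     while lo < hi:
--         mid = (lo + hi) // 2
--         if lst[mid] < pair:
--             lo = mid + 1
--         else:
--             hi = mid
--     lst.insert(lo, pair)
-- ===== Notes on version B (the rewrite author's own statement) =====
-- stated objective: alternative
-- what changed: B maintains the k survivors as a lexicographically sorted list of (value, slot) pairs with O(1) min access and binary-search insertion, instead of A's repeated min()/index() scans and in-place slot overwrite; the array order is reconstructed at the end by re-sorting on slot.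
-- outside the precondition, e.g. on top_k_order_by_value([1, 2, 3], -1): A returns [3, 3], B returns [3, 2]
import Mathlib
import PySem

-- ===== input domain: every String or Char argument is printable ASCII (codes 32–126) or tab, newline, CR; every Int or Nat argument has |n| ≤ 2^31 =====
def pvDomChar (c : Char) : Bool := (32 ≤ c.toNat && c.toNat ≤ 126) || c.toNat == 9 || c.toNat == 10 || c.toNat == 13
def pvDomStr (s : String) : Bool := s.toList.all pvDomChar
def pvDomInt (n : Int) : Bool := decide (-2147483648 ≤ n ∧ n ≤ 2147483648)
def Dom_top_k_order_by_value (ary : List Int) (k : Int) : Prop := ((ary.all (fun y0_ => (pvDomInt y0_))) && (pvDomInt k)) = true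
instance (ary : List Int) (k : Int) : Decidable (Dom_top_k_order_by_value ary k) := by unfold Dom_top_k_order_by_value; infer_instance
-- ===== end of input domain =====

-- B replaces A's per-element min()/index() scans over the result array by a lexicographically
-- sorted list of (value, slot) pairs with head = replacement target and binary-search insertion,
-- rebuilding the array at the end by re-sorting on slot; return values proved equal on Pre_.

-- ===== PORT A =====
-- one iteration of A's loop body, applied to the element x = ary[i]
def pvAUpd (r : List Int) (x : Int) : List Int :=
  match PySem.List.min? r (fun y => y) with
  | none => r          -- min([]) raises in Python; unreachable under Pre_
  | some m =>
    if m < x then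
      match PySem.List.index? r m with
      | none => r      -- unreachable: m ∈ r
      | some j => PySem.List.pySetD r (j : Int) x
    else r

def top_k_order_by_value (ary : List Int) (k : Int) : Option (List Int) :=
  if ((ary.length : Int)) < k then none
  else
    some ((PySem.List.pyRange k (ary.length : Int) 1).foldl
      (fun r i => pvAUpd r (PySem.List.pyGetD ary i 0))
      (PySem.List.slice ary none (some k)))

-- ===== PORT B =====
-- Python tuple comparison (v1, s1) < (v2, s2), lexicographic
def pvPairLtb (p q : Int × Int) : Bool := p.1 < q.1 || (p.1 == q.1 && p.2 < q.2)

-- Source B's _insort binary-search loop: final value of lo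
def pvBisect (lst : List (Int × Int)) (p : Int × Int) (lo hi : Nat) : Nat :=
  if _h : lo < hi then
    if pvPairLtb (lst.getD ((lo + hi) / 2) (0, 0)) p then pvBisect lst p ((lo + hi) / 2 + 1) hi
    else pvBisect lst p lo ((lo + hi) / 2)
  else lo
termination_by hi - lo
decreasing_by all_goals omega

-- Source B's _insort: lst.insert(lo, pair) at the binary-search position
def pvInsortB (lst : List (Int × Int)) (p : Int × Int) : List (Int × Int) :=
  lst.insertIdx (pvBisect lst p 0 lst.length) p

-- Source B's loop body: pop the (min value, min slot) head, insert (x, that slot)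
def pvBStep (st : List (Int × Int)) (x : Int) : List (Int × Int) :=
  match st with
  | [] => []
  | (v0, s0) :: rest => if v0 < x then pvInsortB rest (x, s0) else (v0, s0) :: rest

def top_k_order_by_value_alt (ary : List Int) (k : Int) : Option (List Int) :=
  if ((ary.length : Int)) < k then none
  else
    some ((((PySem.List.slice ary (some k) none).foldl pvBStep
        ((PySem.List.enumerate (PySem.List.slice ary none (some k)) 0).foldl
          (fun st p => pvInsortB st (p.2, p.1)) [])).foldl
        (fun o p => pvInsortB o (p.2, p.1)) []).map (fun p => p.2))

-- ===== PRECONDITION & SPEC =====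
-- Pre_ excludes k ≤ 0 (except the trivial ary = [] with k = 0): for k = 0 on a non-empty list
-- and for k < 0 with len(ary) ≤ -k, A raises ValueError (min of empty sequence); for k < 0 with
-- len(ary) > -k, A returns a value produced by Python's negative-index wraparound (an accident
-- outside the function's natural domain), which B does not imitate.
def Pre_top_k_order_by_value (ary : List Int) (k : Int) : Prop :=
  1 ≤ k ∨ (ary = [] ∧ 0 ≤ k)
instance (ary : List Int) (k : Int) : Decidable (Pre_top_k_order_by_value ary k) := by
  unfold Pre_top_k_order_by_value; infer_instance

def pvWitness_top_k_order_by_value : List Int × Int := ([3, 1, 2, 5, 4], 3)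

def Spec_top_k_order_by_value (ary : List Int) (k : Int) (out : Option (List Int)) : Prop :=
  out = top_k_order_by_value_alt ary k
instance (ary : List Int) (k : Int) (out : Option (List Int)) : Decidable (Spec_top_k_order_by_value ary k out) := by
  unfold Spec_top_k_order_by_value; infer_instance

-- ===== CLAIM (what is proved, stated in full; the proofs are below) =====
def Claim_equal_top_k_order_by_value : Prop := ∀ (ary : List Int) (k : Int), Dom_top_k_order_by_value ary k → Pre_top_k_order_by_value ary k → Spec_top_k_order_by_value ary k (top_k_order_by_value ary k)


-- ===== LEMMAS AND PROOFS =====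

-- strict lexicographic order on (value, slot) pairs, Prop form of pvPairLtb
def pvLt (p q : Int × Int) : Prop := p.1 < q.1 ∨ (p.1 = q.1 ∧ p.2 < q.2)

-- A's result array enumerated as (value, slot) pairs
def pvEnumSwap (r : List Int) : List (Int × Int) :=
  (PySem.List.enumerate r 0).map (fun p => (p.2, p.1))

-- the coupling invariant: B's state is the sorted permutation of A's enumerated result
def pvInv (r : List Int) (s : List (Int × Int)) : Prop :=
  s.Perm (pvEnumSwap r) ∧ s.Pairwise pvLt ∧ r ≠ []

-- proof-side model of _insort: linear insertion into a sorted list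
def pvInsort : List (Int × Int) → (Int × Int) → List (Int × Int)
  | [], p => [p]
  | q :: rest, p => if pvPairLtb q p then q :: pvInsort rest p else p :: q :: rest

-- the linear insertion position: number of leading elements < p
def pvFirstGE : List (Int × Int) → (Int × Int) → Nat
  | [], _ => 0
  | q :: rest, p => if pvPairLtb q p then pvFirstGE rest p + 1 else 0

theorem pvPairLtb_iff (p q : Int × Int) : pvPairLtb p q = true ↔ pvLt p q := by
  unfold pvPairLtb pvLt
  constructor
  · intro h; simp at h; omega
  · intro h; simp; omega

theorem pvLt_total (p q : Int × Int) (h : p ≠ q) : pvLt p q ∨ pvLt q p := by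
  rcases p with ⟨a, b⟩; rcases q with ⟨c, d⟩
  have h' : ¬(a = c ∧ b = d) := by simpa [Prod.ext_iff] using h
  unfold pvLt
  show (a < c ∨ (a = c ∧ b < d)) ∨ (c < a ∨ (c = a ∧ d < b))
  omega

theorem pvLt_asymm (p q : Int × Int) (h1 : pvLt p q) (h2 : pvLt q p) : False := by
  unfold pvLt at h1 h2; omega

theorem pvLt_trans (p q r : Int × Int) (h1 : pvLt p q) (h2 : pvLt q r) : pvLt p r := by
  unfold pvLt at *; omega

theorem pvFirstGE_le (s : List (Int × Int)) (p : Int × Int) : pvFirstGE s p ≤ s.length := by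
  induction s with
  | nil => simp [pvFirstGE]
  | cons q rest ih =>
    unfold pvFirstGE
    split
    · simpa using ih
    · simp

theorem pvFirstGE_lt_of_lt (s : List (Int × Int)) (p : Int × Int) :
    ∀ i : Nat, (h : i < s.length) → i < pvFirstGE s p → pvLt s[i] p := by
  induction s with
  | nil => simp
  | cons q rest ih =>
    intro i h hi
    unfold pvFirstGE at hi
    split at hi
    · rename_i hq
      cases i with
      | zero => exact (pvPairLtb_iff q p).mp hq
      | succ j => exact ih j (by simpa using h) (by omega)
    · omega

theorem pvFirstGE_not_lt (s : List (Int × Int)) (p : Int × Int) (hs : s.Pairwise pvLt) :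
    ∀ i : Nat, (h : i < s.length) → pvFirstGE s p ≤ i → ¬ pvLt s[i] p := by
  induction s with
  | nil => simp
  | cons q rest ih =>
    intro i h hi
    rcases List.pairwise_cons.mp hs with ⟨hq, hrest⟩
    unfold pvFirstGE at hi
    split at hi
    · rename_i hqp
      cases i with
      | zero => omega
      | succ j => exact ih hrest j (by simpa using h) (by omega)
    · rename_i hqp
      cases i with
      | zero => simpa using fun hc => hqp ((pvPairLtb_iff q p).mpr hc)
      | succ j =>
        intro hc
        have hjlen : j < rest.length := by simpa using h
        have h1 : pvLt q (rest[j]'hjlen) := hq _ (List.getElem_mem hjlen)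
        have h2 : pvLt q p := pvLt_trans _ _ _ h1 (by simpa using hc)
        exact hqp ((pvPairLtb_iff q p).mpr h2)

theorem pvBisect_eq (s : List (Int × Int)) (p : Int × Int) (hs : s.Pairwise pvLt) :
    ∀ (n lo hi : Nat), hi - lo = n → lo ≤ pvFirstGE s p → pvFirstGE s p ≤ hi → hi ≤ s.length →
    pvBisect s p lo hi = pvFirstGE s p := by
  intro n
  induction n using Nat.strong_induction_on with
  | _ n ih =>
    intro lo hi hn h1 h2 h3
    rw [pvBisect]
    split
    · rename_i hlt
      have hmid : (lo + hi) / 2 < s.length := by omega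
      have hgd : s.getD ((lo + hi) / 2) (0, 0) = s[(lo + hi) / 2] := List.getD_eq_getElem s (0, 0) hmid
      split
      · rename_i hcmp
        rw [hgd] at hcmp
        have hFg : ¬ (pvFirstGE s p ≤ (lo + hi) / 2) := fun hF =>
          pvFirstGE_not_lt s p hs _ hmid hF ((pvPairLtb_iff _ _).mp hcmp)
        exact ih (hi - ((lo + hi) / 2 + 1)) (by omega) ((lo + hi) / 2 + 1) hi rfl (by omega) h2 h3
      · rename_i hcmp
        rw [hgd] at hcmp
        have hFg : ¬ ((lo + hi) / 2 < pvFirstGE s p) := fun hF =>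
          hcmp ((pvPairLtb_iff _ _).mpr (pvFirstGE_lt_of_lt s p _ hmid hF))
        exact ih ((lo + hi) / 2 - lo) (by omega) lo ((lo + hi) / 2) rfl h1 (by omega) (by omega)
    · omega

theorem pvInsort_eq_insertIdx (s : List (Int × Int)) (p : Int × Int) :
    pvInsort s p = s.insertIdx (pvFirstGE s p) p := by
  induction s with
  | nil => simp [pvInsort, pvFirstGE]
  | cons q rest ih =>
    unfold pvInsort pvFirstGE
    split
    · rw [ih]; rfl
    · rfl

-- on a sorted list, Source B's binary-search insert is the linear insert
theorem pvInsortB_eq (s : List (Int × Int)) (p : Int × Int) (hs : s.Pairwise pvLt) :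
    pvInsortB s p = pvInsort s p := by
  unfold pvInsortB
  rw [pvBisect_eq s p hs (s.length - 0) 0 s.length rfl (by omega) (pvFirstGE_le s p) le_rfl,
    pvInsort_eq_insertIdx]

theorem pvInsort_perm (s : List (Int × Int)) (p : Int × Int) : (pvInsort s p).Perm (p :: s) := by
  induction s with
  | nil => simp [pvInsort]
  | cons q rest ih =>
    unfold pvInsort
    split
    · exact ((ih.cons q).trans (List.Perm.swap p q rest))
    · exact List.Perm.refl _

theorem pvInsort_sorted (s : List (Int × Int)) (p : Int × Int)
    (hs : s.Pairwise pvLt) (hp : p ∉ s) : (pvInsort s p).Pairwise pvLt := by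
  induction s with
  | nil => simp [pvInsort, List.pairwise_cons]
  | cons q rest ih =>
    rcases List.pairwise_cons.mp hs with ⟨hq, hrest⟩
    simp only [List.mem_cons, not_or] at hp
    unfold pvInsort
    split
    · rename_i hqp
      refine List.pairwise_cons.mpr ⟨?_, ih hrest hp.2⟩
      intro a ha
      rcases List.mem_cons.mp ((pvInsort_perm rest p).mem_iff.mp ha) with h | h
      · rw [h]; exact (pvPairLtb_iff q p).mp hqp
      · exact hq a h
    · rename_i hqp
      have hne : p ≠ q := fun he => hp.1 he
      have hpq : pvLt p q := by
        rcases pvLt_total p q hne with h | h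
        · exact h
        · exact absurd ((pvPairLtb_iff q p).mpr h) (by simpa using hqp)
      refine List.pairwise_cons.mpr ⟨?_, hs⟩
      intro a ha
      rcases List.mem_cons.mp ha with h | h
      · subst h; exact hpq
      · have := hq a h
        unfold pvLt at *
        omega

theorem pvFoldlInsort (l : List (Int × Int)) : ∀ acc : List (Int × Int),
    acc.Pairwise pvLt → l.Nodup → (∀ p ∈ l, p ∉ acc) →
    (l.foldl (fun st p => pvInsortB st p) acc).Perm (acc ++ l) ∧
    (l.foldl (fun st p => pvInsortB st p) acc).Pairwise pvLt := by
  induction l with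
  | nil => intro acc h1 _ _; simpa using h1
  | cons p l' ih =>
    intro acc h1 h2 h3
    simp only [List.foldl_cons]
    rw [pvInsortB_eq acc p h1]
    have hpacc : p ∉ acc := h3 p (by simp)
    have hsorted := pvInsort_sorted acc p h1 hpacc
    have hperm := pvInsort_perm acc p
    have hnodup' : l'.Nodup := (List.nodup_cons.mp h2).2
    have hnot : ∀ q ∈ l', q ∉ pvInsort acc p := by
      intro q hq hmem
      rcases List.mem_cons.mp (hperm.mem_iff.mp hmem) with h | h
      · exact (List.nodup_cons.mp h2).1 (h ▸ hq)
      · exact h3 q (by simp [hq]) h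
    rcases ih (pvInsort acc p) hsorted hnodup' hnot with ⟨hA, hB⟩
    refine ⟨?_, hB⟩
    exact (hA.trans (hperm.append_right l')).trans List.perm_middle.symm

-- membership in the enumerated result
theorem pvMem_enumSwap (r : List Int) (q : Int × Int) :
    q ∈ pvEnumSwap r ↔ ∃ (i : Nat) (h : i < r.length), q = (r[i], (i : Int)) := by
  unfold pvEnumSwap
  simp only [List.mem_map, PySem.List.mem_enumerate_iff]
  constructor
  · rintro ⟨p, ⟨i, hi, rfl⟩, rfl⟩; exact ⟨i, hi, by simp⟩
  · rintro ⟨i, hi, rfl⟩; exact ⟨((i : Int), r[i]), ⟨i, hi, by simp⟩, rfl⟩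

theorem pvEnumSwap_length (r : List Int) : (pvEnumSwap r).length = r.length := by
  simp [pvEnumSwap, PySem.List.length_enumerate]

theorem pvEnumSwap_getElem (r : List Int) (i : Nat) (h : i < r.length) :
    (pvEnumSwap r)[i]'(by rwa [pvEnumSwap_length]) = (r[i], (i : Int)) := by
  simp [pvEnumSwap, PySem.List.getElem_enumerate]

-- slots of B's state are distinct
theorem pvSlots_nodup (r : List Int) (s : List (Int × Int)) (h : s.Perm (pvEnumSwap r)) :
    (s.map (fun p => p.2)).Nodup := by
  have he : (pvEnumSwap r).map (fun p => p.2) = PySem.List.pyRange 0 (r.length : Int) 1 := by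
    unfold pvEnumSwap
    rw [List.map_map]
    have h2 : ((fun p : Int × Int => p.2) ∘ (fun p : Int × Int => (p.2, p.1)))
        = (fun p : Int × Int => p.1) := rfl
    rw [h2]
    simpa using PySem.List.map_fst_enumerate r 0
  have h2 := (h.map (fun p => p.2)).nodup_iff
  rw [he] at h2
  exact h2.mpr (by simpa using PySem.List.nodup_pyRange_one 0 (r.length : Int))

theorem pvEnumSwap_nodup (r : List Int) : (pvEnumSwap r).Nodup :=
  (pvSlots_nodup r (pvEnumSwap r) (List.Perm.refl _)).of_map

-- the head of B's state determines A's min and index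
theorem pvHead_spec (r : List Int) (v0 s0 : Int) (rest : List (Int × Int))
    (hperm : ((v0, s0) :: rest).Perm (pvEnumSwap r))
    (hsort : ((v0, s0) :: rest).Pairwise pvLt) :
    PySem.List.min? r (fun y => y) = some v0 ∧
    ∃ j : Nat, s0 = (j : Int) ∧ ∃ hj : j < r.length, r[j] = v0 ∧ PySem.List.index? r v0 = some j := by
  have hmemE : (v0, s0) ∈ pvEnumSwap r := hperm.mem_iff.mp (by simp)
  rcases (pvMem_enumSwap r _).mp hmemE with ⟨j, hj, hEq⟩
  have hv0 : r[j] = v0 := ((Prod.mk.injEq _ _ _ _).mp hEq).1.symm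
  have hs0 : s0 = (j : Int) := ((Prod.mk.injEq _ _ _ _).mp hEq).2
  have hminall : ∀ q ∈ pvEnumSwap r, q = (v0, s0) ∨ pvLt (v0, s0) q := by
    intro q hq
    rcases List.mem_cons.mp (hperm.symm.mem_iff.mp hq) with h | h
    · exact Or.inl h
    · exact Or.inr ((List.pairwise_cons.mp hsort).1 q h)
  have hvmin : ∀ i : Nat, (h : i < r.length) → v0 ≤ r[i] := by
    intro i hi
    have hmem : ((r[i] : Int), (i : Int)) ∈ pvEnumSwap r := (pvMem_enumSwap r _).mpr ⟨i, hi, rfl⟩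
    rcases hminall _ hmem with h | h
    · have h2 : r[i] = v0 := congrArg Prod.fst h
      omega
    · rcases h with h | ⟨h, _⟩
      · exact le_of_lt h
      · exact le_of_eq h
  have hne : r ≠ [] := by
    intro h; subst h; simp at hj
  constructor
  · cases hm : PySem.List.min? r (fun y => y) with
    | none => exact absurd ((PySem.List.min?_eq_none_iff _ _).mp hm) hne
    | some m =>
      have hmmem : m ∈ r := PySem.List.min?_mem hm
      have hmin := PySem.List.min?_isMin hm
      have h1 : m ≤ v0 := hmin v0 (hv0 ▸ List.getElem_mem hj)
      have h2 : v0 ≤ m := by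
        rcases List.getElem_of_mem hmmem with ⟨i, hi, hrm⟩
        have := hvmin i hi; omega
      have : m = v0 := le_antisymm h1 h2
      rw [this]
  · refine ⟨j, hs0, hj, hv0, ?_⟩
    have hfirst : ∀ i : Nat, i < j → (hi : i < r.length) → r[i] ≠ v0 := by
      intro i hij hi hbad
      have hmem : ((r[i] : Int), (i : Int)) ∈ pvEnumSwap r := (pvMem_enumSwap r _).mpr ⟨i, hi, rfl⟩
      rcases hminall _ hmem with h | h
      · have h2 : ((i : Int)) = s0 := congrArg Prod.snd h
        rw [hs0] at h2
        omega
      · rcases h with h | ⟨_, h2⟩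
        · rw [hbad] at h
          exact absurd h (lt_irrefl v0)
        · rw [hs0] at h2
          omega
    rw [PySem.List.index?_eq_some_iff]
    refine ⟨r.take j, r.drop (j+1), ?_, ?_, ?_⟩
    · conv_lhs => rw [← List.take_append_drop j r]
      rw [List.drop_eq_getElem_cons hj, hv0]
    · simp [List.length_take]; omega
    · intro hmem
      rcases List.getElem_of_mem hmem with ⟨i, hi, hval⟩
      have hij : i < j := by simp [List.length_take] at hi; omega
      have hi' : i < r.length := by omega
      apply hfirst i hij hi'
      rw [← hval, List.getElem_take]

-- setting one slot changes exactly that entry of the enumeration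
theorem pvEnumSwap_set (r : List Int) (j : Nat) (hj : j < r.length) (x : Int) :
    pvEnumSwap (r.set j x) = (pvEnumSwap r).set j (x, (j : Int)) := by
  apply List.ext_getElem
  · simp [pvEnumSwap_length]
  · intro i h1 h2
    have hi : i < r.length := by simpa [pvEnumSwap_length] using h1
    rw [List.getElem_set]
    by_cases hij : j = i
    · subst hij
      rw [if_pos rfl]
      rw [pvEnumSwap_getElem (r.set j x) j (by simpa using hj)]
      simp
    · rw [if_neg hij]
      rw [pvEnumSwap_getElem (r.set j x) i (by simpa using hi), pvEnumSwap_getElem r i hi]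
      rw [List.getElem_set_ne hij]

theorem pvSet_perm_cons (l : List (Int × Int)) (j : Nat) (hj : j < l.length) (b : Int × Int) :
    (l.set j b).Perm (b :: l.eraseIdx j) := by
  rw [List.set_eq_take_append_cons_drop, if_pos hj, List.eraseIdx_eq_take_drop_succ]
  exact List.perm_middle

theorem pvSelf_perm_cons (l : List (Int × Int)) (j : Nat) (hj : j < l.length) :
    l.Perm (l[j] :: l.eraseIdx j) := by
  conv_lhs => rw [← List.set_getElem_self (h := hj)]
  exact pvSet_perm_cons l j (by simpa using hj) _

-- the loop step preserves the invariant
theorem pvStep (r : List Int) (s : List (Int × Int)) (x : Int) (h : pvInv r s) :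
    pvInv (pvAUpd r x) (pvBStep s x) := by
  rcases h with ⟨hperm, hsort, hne⟩
  cases s with
  | nil =>
    exfalso
    have h1 : pvEnumSwap r = [] := hperm.symm.eq_nil
    have h2 := pvEnumSwap_length r
    rw [h1] at h2
    exact hne (List.length_eq_zero_iff.mp h2.symm)
  | cons hd rest =>
    rcases hd with ⟨v0, s0⟩
    rcases pvHead_spec r v0 s0 rest hperm hsort with ⟨hmin, j, hs0, hj, hv0, hidx⟩
    simp only [pvAUpd, pvBStep, hmin, hidx]
    by_cases hcmp : v0 < x
    · rw [if_pos hcmp, if_pos hcmp]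
      subst hs0
      rw [PySem.List.pySetD_natCast,
        pvInsortB_eq rest (x, (j : Int)) (List.pairwise_cons.mp hsort).2]
      have hjE : j < (pvEnumSwap r).length := by rwa [pvEnumSwap_length]
      have h2 : (pvEnumSwap r).Perm ((v0, (j : Int)) :: (pvEnumSwap r).eraseIdx j) := by
        have h3 := pvSelf_perm_cons (pvEnumSwap r) j hjE
        rwa [pvEnumSwap_getElem r j hj, hv0] at h3
      have hrest : rest.Perm ((pvEnumSwap r).eraseIdx j) := (hperm.trans h2).cons_inv
      refine ⟨?_, ?_, ?_⟩
      · have h1 : (pvEnumSwap (r.set j x)).Perm ((x, (j : Int)) :: (pvEnumSwap r).eraseIdx j) := by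
          rw [pvEnumSwap_set r j hj x]
          exact pvSet_perm_cons _ j hjE _
        exact ((pvInsort_perm rest (x, (j : Int))).trans (hrest.cons _)).trans h1.symm
      · apply pvInsort_sorted rest _ (List.pairwise_cons.mp hsort).2
        intro hmem
        have hs := pvSlots_nodup r _ hperm
        simp only [List.map_cons, List.nodup_cons] at hs
        exact hs.1 (List.mem_map.mpr ⟨_, hmem, rfl⟩)
      · intro hnil
        have : r.length = 0 := by simpa using congrArg List.length hnil
        exact hne (List.length_eq_zero_iff.mp this)
    · rw [if_neg hcmp, if_neg hcmp]
      exact ⟨hperm, hsort, hne⟩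

-- the fold preserves the invariant
theorem pvFold (xs : List Int) : ∀ (r : List Int) (s : List (Int × Int)), pvInv r s →
    pvInv (xs.foldl pvAUpd r) (xs.foldl pvBStep s) := by
  induction xs with
  | nil => intro r s h; exact h
  | cons x xs' ih => intro r s h; exact ih _ _ (pvStep r s x h)

-- initialization establishes the invariant
theorem pvInit (r0 : List Int) (h : r0 ≠ []) :
    pvInv r0 ((PySem.List.enumerate r0 0).foldl (fun st p => pvInsortB st (p.2, p.1)) []) := by
  have hfold : (PySem.List.enumerate r0 0).foldl (fun st p => pvInsortB st (p.2, p.1)) []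
      = (pvEnumSwap r0).foldl (fun st p => pvInsortB st p) [] := by
    unfold pvEnumSwap
    rw [List.foldl_map]
  rw [hfold]
  rcases pvFoldlInsort (pvEnumSwap r0) [] (by simp) (pvEnumSwap_nodup r0) (by simp) with ⟨hp, hs⟩
  exact ⟨by simpa using hp, hs, h⟩

-- two sorted permutations of each other are equal
theorem pvSorted_perm_eq (l1 l2 : List (Int × Int)) (hp : l1.Perm l2)
    (h1 : l1.Pairwise pvLt) (h2 : l2.Pairwise pvLt) : l1 = l2 := by
  refine hp.eq_of_pairwise ?_ h1 h2
  intro a b hma hmb hab hba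
  exact absurd hba (fun h => pvLt_asymm a b hab h)

-- finalization: re-sorting the state by slot recovers A's result array
theorem pvFinal (r : List Int) (s : List (Int × Int)) (h : pvInv r s) :
    ((s.foldl (fun o p => pvInsortB o (p.2, p.1)) []).map (fun p => p.2)) = r := by
  rcases h with ⟨hperm, hsort, hne⟩
  have hfold : s.foldl (fun o p => pvInsortB o (p.2, p.1)) []
      = (s.map (fun p => (p.2, p.1))).foldl (fun st p => pvInsortB st p) [] := by
    rw [List.foldl_map]
  have hnodup : (s.map (fun p => (p.2, p.1))).Nodup := by
    apply List.Nodup.of_map (f := fun q : Int × Int => q.1)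
    rw [List.map_map]
    exact pvSlots_nodup r s hperm
  rcases pvFoldlInsort (s.map (fun p => (p.2, p.1))) [] (by simp) hnodup (by simp) with ⟨hp, hs⟩
  have hperm2 : (s.map (fun p => (p.2, p.1))).Perm (PySem.List.enumerate r 0) := by
    have h3 := hperm.map (fun p : Int × Int => (p.2, p.1))
    unfold pvEnumSwap at h3
    rw [List.map_map] at h3
    have hid : ((fun p : Int × Int => (p.2, p.1)) ∘ (fun p : Int × Int => (p.2, p.1)))
        = (id : Int × Int → Int × Int) := rfl
    rw [hid, List.map_id] at h3
    exact h3
  have hsorted_enum : (PySem.List.enumerate r 0).Pairwise pvLt := by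
    apply List.Pairwise.imp _ (PySem.List.pairwise_lt_enumerate r 0)
    intro a b hab
    exact Or.inl hab
  have hEq : s.foldl (fun o p => pvInsortB o (p.2, p.1)) [] = PySem.List.enumerate r 0 := by
    rw [hfold]
    exact pvSorted_perm_eq _ _ ((hp.trans (by simp)).trans hperm2) hs hsorted_enum
  rw [hEq]
  exact PySem.List.map_snd_enumerate r 0

-- ===== VERDICT (by name: the statement is the Claim_ definition above) =====
theorem top_k_order_by_value_spec : Claim_equal_top_k_order_by_value := by
  intro ary k _ hpre
  unfold Spec_top_k_order_by_value top_k_order_by_value top_k_order_by_value_alt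
  by_cases hlen : ((ary.length : Int)) < k
  · rw [if_pos hlen, if_pos hlen]
  · rw [if_neg hlen, if_neg hlen]
    rcases hpre with hk | ⟨hnil, hk0⟩
    · -- main case: 1 ≤ k ≤ len(ary)
      have hk0 : (0 : Int) ≤ k := by omega
      rw [PySem.List.slice_to ary hk0, PySem.List.slice_from ary hk0,
        show ((ary.length : Int)) = PySem.List.len ary from rfl,
        PySem.List.foldl_pyRange_pyGetD ary 0 pvAUpd (List.take k.toNat ary) hk0]
      have hne : ary.take k.toNat ≠ [] := by
        intro h
        have h2 := congrArg List.length h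
        simp only [List.length_take, List.length_nil] at h2
        omega
      have hinv := pvFold (ary.drop k.toNat) _ _ (pvInit (ary.take k.toNat) hne)
      rw [pvFinal _ _ hinv]
    · subst hnil
      have hk : k = 0 := by
        simp at hlen
        omega
      subst hk
      decide
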